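-- pv_equiv track=rewrite | github.com/fk128/midatasets | midatasets/utils.py | find_longest_matching_name
-- ===== SOURCE A (Python) =====
-- def find_longest_matching_name(name, filenames):
--     longest_name = ""
--     for existing_name in filenames:
--         if existing_name in name and len(existing_name) > len(
--             longest_name
--         ):  # check if subset of existing name
--             longest_name = existing_name
--     if len(longest_name) > 0:
--         name = longest_name
--     return name
-- ===== SOURCE B (Python) =====
-- def find_longest_matching_name(name, filenames):
--     for f in sorted(filenames, key=len, reverse=True):
--         if f and f in name:
--             return f
--     return name
-- ===== Notes on version B (the rewrite author's own statement) =====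
-- stated objective: faster
-- what changed: Replaces the scan-and-track-maximum over all filenames with a stable length-descending sort followed by returning the first nonempty filename that is a substring of name (fallback: name), which stops at the first hit instead of running the substring test on every filename.
import Mathlib
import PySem

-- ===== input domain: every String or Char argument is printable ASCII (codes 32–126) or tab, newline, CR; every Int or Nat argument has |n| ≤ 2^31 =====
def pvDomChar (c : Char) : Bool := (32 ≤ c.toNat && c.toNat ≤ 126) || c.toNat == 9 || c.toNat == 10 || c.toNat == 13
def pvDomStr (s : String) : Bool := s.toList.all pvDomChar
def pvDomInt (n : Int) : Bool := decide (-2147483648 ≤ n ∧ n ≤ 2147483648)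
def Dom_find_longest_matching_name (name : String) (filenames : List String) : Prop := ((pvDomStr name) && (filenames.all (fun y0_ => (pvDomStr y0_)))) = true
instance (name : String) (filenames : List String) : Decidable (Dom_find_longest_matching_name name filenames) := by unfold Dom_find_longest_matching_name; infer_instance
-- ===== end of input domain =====

-- B sorts the filenames by length descending (stable) and returns the first nonempty substring
-- of name, instead of A's scan-and-track-maximum; objective: alternative decomposition, same result.


-- ===== PORT A =====
-- A: scan the list, keeping the longest filename so far that is a substring of name.
def find_longest_matching_name (name : String) (filenames : List String) : String :=
  let longest_name := filenames.foldl
    (fun longest_name existing_name =>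
      if PySem.Str.isIn existing_name name &&
         decide (PySem.Str.len existing_name > PySem.Str.len longest_name)
      then existing_name else longest_name) ""
  if PySem.Str.len longest_name > 0 then longest_name else name

-- ===== PORT B =====
-- B: iterate the length-descending stable sort; return the first nonempty substring of name.
def pvAltGo (name : String) : List String → String
  | [] => name
  | f :: rest =>
      if decide (f ≠ "") && PySem.Str.isIn f name then f else pvAltGo name rest

def find_longest_matching_name_alt (name : String) (filenames : List String) : String :=
  pvAltGo name (PySem.List.sorted filenames (fun f => PySem.Str.len f) true)

-- ===== PRECONDITION & SPEC =====
def Spec_find_longest_matching_name (name : String) (filenames : List String) (out : String) : Prop := out = find_longest_matching_name_alt name filenames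
instance (name : String) (filenames : List String) (out : String) : Decidable (Spec_find_longest_matching_name name filenames out) := by unfold Spec_find_longest_matching_name; infer_instance

-- ===== CLAIM (what is proved, stated in full; the proofs are below) =====
def Claim_equal_find_longest_matching_name : Prop := ∀ (name : String) (filenames : List String), Dom_find_longest_matching_name name filenames → Spec_find_longest_matching_name name filenames (find_longest_matching_name name filenames)

-- ===== LEMMAS AND PROOFS =====

-- B's match predicate: nonempty and a substring of name
def pvP (name f : String) : Bool := decide (f ≠ "") && PySem.Str.isIn f name

-- first element of the list satisfying pvP, if any
def pvFirst (name : String) : List String → Option String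
  | [] => none
  | f :: rest => if pvP name f then some f else pvFirst name rest

-- A's fold step
def pvStep (name longest f : String) : String :=
  if PySem.Str.isIn f name && decide (PySem.Str.len f > PySem.Str.len longest)
  then f else longest

theorem pvAltGo_eq_first (name : String) (s : List String) :
    pvAltGo name s = (pvFirst name s).getD name := by
  induction s with
  | nil => rfl
  | cons f rest ih =>
      simp only [pvAltGo, pvFirst, pvP]
      split <;> simp [ih]

theorem pvFirst_mem (name : String) (s : List String) (m : String)
    (h : pvFirst name s = some m) : m ∈ s := by
  induction s with
  | nil => simp [pvFirst] at h
  | cons f rest ih =>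
      simp only [pvFirst] at h
      split at h
      · simp at h; simp [h]
      · exact List.mem_cons_of_mem _ (ih h)

theorem pvLen_nonneg (s : String) : 0 ≤ PySem.Str.len s := by
  rw [PySem.Str.len_eq]; exact Int.natCast_nonneg _

theorem pvLen_pos (s : String) (h : s ≠ "") : 0 < PySem.Str.len s := by
  rw [PySem.Str.len_eq]
  have : s.toList ≠ [] := fun h' => h (String.ext (by simpa using h'))
  have := List.length_pos_iff.mpr this
  exact_mod_cast this

-- inserting an element that does not match leaves the first match unchanged
theorem pvFirst_insert_notP (name x : String) (bf : String → String → Bool)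
    (s : List String) (hx : pvP name x = false) :
    pvFirst name (PySem.List.insertBy bf x s) = pvFirst name s := by
  induction s with
  | nil => simp [PySem.List.insertBy, pvFirst, hx]
  | cons y ys ih =>
      simp only [PySem.List.insertBy]
      split
      · simp [pvFirst, hx]
      · simp only [pvFirst]; split <;> simp_all

-- inserting a matching element into a list with no match: it becomes the first match
theorem pvFirst_insert_none (name x : String) (bf : String → String → Bool)
    (s : List String) (hx : pvP name x = true) (hs : pvFirst name s = none) :
    pvFirst name (PySem.List.insertBy bf x s) = some x := by
  induction s with
  | nil => simp [PySem.List.insertBy, pvFirst, hx]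
  | cons y ys ih =>
      simp only [pvFirst] at hs
      split at hs
      · simp at hs
      · simp only [PySem.List.insertBy]
        split
        · simp [pvFirst, hx]
        · rename_i hy _; simp only [pvFirst]; rw [if_neg (by simp_all)]; exact ih hs

-- length-sorted list, matching x longer than the current first match: x becomes the first match
theorem pvFirst_insert_longer (name x : String) (s : List String) (m : String)
    (hpw : s.Pairwise (fun a b => PySem.Str.len b ≤ PySem.Str.len a))
    (hx : pvP name x = true) (hm : pvFirst name s = some m)
    (hlt : PySem.Str.len m < PySem.Str.len x) :
    pvFirst name (PySem.List.insertBy (fun a b => decide (PySem.Str.len b < PySem.Str.len a)) x s)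
      = some x := by
  induction s with
  | nil => simp [pvFirst] at hm
  | cons y ys ih =>
      simp only [pvFirst] at hm
      simp only [PySem.List.insertBy]
      by_cases hby : PySem.Str.len y < PySem.Str.len x
      · rw [if_pos (by simpa using hby)]
        simp [pvFirst, hx]
      · rw [if_neg (by simpa using hby)]
        split at hm
        · -- y is the first match: m = y, but len m < len x ≤ len y — contradiction
          cases hm
          simp only [PySem.Str.len_eq, String.length_toList] at *
          omega
        · rename_i hy
          simp only [pvFirst]
          rw [if_neg (by simp_all)]
          exact ih (List.Pairwise.of_cons hpw) hm

-- length-sorted list, x no longer than the current first match: the first match is unchanged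
theorem pvFirst_insert_shorter (name x : String) (s : List String) (m : String)
    (hpw : s.Pairwise (fun a b => PySem.Str.len b ≤ PySem.Str.len a))
    (hm : pvFirst name s = some m)
    (hle : PySem.Str.len x ≤ PySem.Str.len m) :
    pvFirst name (PySem.List.insertBy (fun a b => decide (PySem.Str.len b < PySem.Str.len a)) x s)
      = some m := by
  induction s with
  | nil => simp [pvFirst] at hm
  | cons y ys ih =>
      simp only [pvFirst] at hm
      split at hm
      · -- y is the first match; x is not inserted before it
        cases hm
        rename_i hy
        simp only [PySem.List.insertBy]
        rw [if_neg (by simp only [PySem.Str.len_eq, String.length_toList] at *; simp; omega)]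
        simp [pvFirst, hy]
      · rename_i hy
        have hmem : m ∈ ys := pvFirst_mem name ys m hm
        have hym : PySem.Str.len m ≤ PySem.Str.len y := by
          exact (List.pairwise_cons.mp hpw).1 m hmem
        simp only [PySem.List.insertBy]
        rw [if_neg (by simp only [PySem.Str.len_eq, String.length_toList] at *; simp; omega)]
        simp only [pvFirst]
        rw [if_neg (by simp_all)]
        exact ih (List.Pairwise.of_cons hpw) hm

theorem pvSorted_append (xs : List String) (x : String) :
    PySem.List.sorted (xs ++ [x]) (fun f => PySem.Str.len f) true
      = PySem.List.insertBy (fun a b => decide (PySem.Str.len b < PySem.Str.len a)) x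
          (PySem.List.sorted xs (fun f => PySem.Str.len f) true) := by
  simp [PySem.List.sorted, List.foldl_append]

-- main invariant: the first match of the sorted list is exactly A's fold result (none if "")
theorem pvMain (name : String) (xs : List String) :
    pvFirst name (PySem.List.sorted xs (fun f => PySem.Str.len f) true)
      = (if xs.foldl (pvStep name) "" = "" then none else some (xs.foldl (pvStep name) "")) := by
  induction xs using List.reverseRecOn with
  | nil => simp [PySem.List.sorted, pvFirst]
  | append_singleton xs x ih =>
      rw [pvSorted_append, List.foldl_append]
      have hpw := PySem.List.sorted_pairwise_rev xs (fun f => PySem.Str.len f)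
      set L := xs.foldl (pvStep name) "" with hL
      simp only [List.foldl_cons, List.foldl_nil]
      by_cases hpx : pvP name x = true
      · have hxne : x ≠ "" := by
          by_contra h
          simp [pvP, h] at hpx
        have hxin : PySem.Str.isIn x name = true := by
          simp [pvP] at hpx; exact hpx.2
        by_cases hLe : L = ""
        · -- no previous match: x becomes the match, and A updates to x
          rw [pvFirst_insert_none name x _ _ hpx (by rw [ih, if_pos hLe])]
          have hstep : pvStep name L x = x := by
            simp only [pvStep, hxin, hLe]
            rw [if_pos]
            have := pvLen_pos x hxne
            simp only [PySem.Str.len_eq, String.length_toList] at *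
            simp
            omega
          rw [hstep, if_neg hxne]
        · by_cases hlt : PySem.Str.len L < PySem.Str.len x
          · have hstep : pvStep name L x = x := by
              simp only [pvStep, hxin]
              rw [if_pos]
              simp only [PySem.Str.len_eq, String.length_toList] at *
              simp
              omega
            rw [hstep, if_neg hxne]
            exact pvFirst_insert_longer name x _ L hpw hpx (by rw [ih, if_neg hLe]) hlt
          · have hstep : pvStep name L x = L := by
              simp only [pvStep]
              rw [if_neg]
              simp only [PySem.Str.len_eq, String.length_toList] at *
              simp
              intro _
              omega
            rw [hstep, if_neg hLe]
            exact pvFirst_insert_shorter name x _ L hpw (by rw [ih, if_neg hLe]) (by omega)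
      · -- x does not match: neither side changes
        have hpx' : pvP name x = false := by simpa using hpx
        rw [pvFirst_insert_notP name x _ _ hpx', ih]
        have : pvStep name L x = L := by
          simp only [pvStep]
          rw [if_neg]
          simp [pvP] at hpx'
          by_cases hx0 : x = ""
          · have := pvLen_nonneg L
            simp only [hx0, PySem.Str.len_eq] at *
            simp
          · simp [hpx' hx0]
        rw [this]

-- ===== VERDICT (by name: the statement is the Claim_ definition above) =====
theorem find_longest_matching_name_spec : Claim_equal_find_longest_matching_name := by
  intro name filenames _
  show find_longest_matching_name name filenames = find_longest_matching_name_alt name filenames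
  unfold find_longest_matching_name find_longest_matching_name_alt
  rw [pvAltGo_eq_first, pvMain]
  have hfold : filenames.foldl
      (fun longest_name existing_name =>
        if PySem.Str.isIn existing_name name &&
           decide (PySem.Str.len existing_name > PySem.Str.len longest_name)
        then existing_name else longest_name) "" = filenames.foldl (pvStep name) "" := rfl
  rw [hfold]
  set L := filenames.foldl (pvStep name) "" with hL
  by_cases hLe : L = ""
  · simp [hLe, PySem.Str.len_eq]
  · have hpos := pvLen_pos L hLe
    rw [if_neg hLe, if_pos hpos]
    simp
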